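-- pv_equiv track=rewrite | github.com/Muhammad-Shaharyar-0/Othello | main.py | left_tile_check
-- ===== SOURCE A (Python) =====
-- def left_tile_check(arr, x_axis, y_axis, t):
--     if arr[x_axis][y_axis] == '.':
--         return 0  # null space
--     elif arr[x_axis][y_axis] == t:
--         return 1  # same tile
--     else:
--         temp = 0
--         j = y_axis - 1
--         if j >= 0:
--             if t == 'x':
--                 other_tile = 'o'
--             else:
--                 other_tile = 'x'
--             for item in range(j, -1, -1):
--                 if arr[x_axis][item] == t:
--                     temp = 2
--                 if arr[x_axis][item] == '.':
--                     break
--             if temp == 2: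
--                 return 2
--             else:
--                 return 0
--         else:
--             return 0
-- ===== SOURCE B (Python) =====
-- def left_tile_check(arr, x_axis, y_axis, t):
--     cell = arr[x_axis][y_axis]
--     if cell == '.':
--         return 0
--     if cell == t:
--         return 1
--     if y_axis < 1:
--         return 0
--     left = arr[x_axis][:y_axis]
--     if '.' in left:
--         gap = len(left) - 1 - left[::-1].index('.')
--         window = left[gap:]
--     else:
--         window = left
--     return 2 if t in window else 0
-- ===== Notes on version B (the rewrite author's own statement) =====
-- stated objective: alternative
-- what changed: A's single right-to-left flag-carrying scan with break is replaced by a boundary-location step (slice the row left of y_axis, find the nearest gap via a reversed index lookup) followed by a plain membership test on that window.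
import Mathlib
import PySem

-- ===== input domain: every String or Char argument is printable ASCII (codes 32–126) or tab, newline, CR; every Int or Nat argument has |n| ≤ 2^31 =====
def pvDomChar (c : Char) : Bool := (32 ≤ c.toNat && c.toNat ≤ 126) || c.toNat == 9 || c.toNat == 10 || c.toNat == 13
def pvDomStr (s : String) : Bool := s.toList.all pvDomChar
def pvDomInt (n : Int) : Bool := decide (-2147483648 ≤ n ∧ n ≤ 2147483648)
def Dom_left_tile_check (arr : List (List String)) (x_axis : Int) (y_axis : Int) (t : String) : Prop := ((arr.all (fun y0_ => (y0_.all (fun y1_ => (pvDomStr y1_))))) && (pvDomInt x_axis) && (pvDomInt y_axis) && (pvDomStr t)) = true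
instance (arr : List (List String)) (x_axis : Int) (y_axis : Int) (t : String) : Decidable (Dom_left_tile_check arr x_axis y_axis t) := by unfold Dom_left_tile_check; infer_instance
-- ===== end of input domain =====

-- B replaces A's flag-carrying break-scan by locating the nearest gap to the left and a membership
-- test on the resulting window (alternative decomposition, same cost).

-- ===== PORT A =====
-- the 'for item in range(j, -1, -1)' loop with its break and the temp flag
def pvALoop (row : List String) (t : String) : List Int → Int → Int
  | [], temp => temp
  | i :: rest, temp =>
    let c := (PySem.List.pyGet? row i).getD ""
    let temp' := if c == t then 2 else temp
    if c == "." then temp' else pvALoop row t rest temp'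

def left_tile_check (arr : List (List String)) (x_axis : Int) (y_axis : Int) (t : String) : Int :=
  let row := (PySem.List.pyGet? arr x_axis).getD []
  let cell := (PySem.List.pyGet? row y_axis).getD ""
  if cell == "." then 0
  else if cell == t then 1
  else
    let j := y_axis - 1
    if j ≥ 0 then
      let _other_tile := if t == "x" then "o" else "x"   -- dead in A, kept for fidelity
      let temp := pvALoop row t (PySem.List.pyRange j (-1) (-1)) 0
      if temp == 2 then 2 else 0
    else 0

-- ===== PORT B =====
def left_tile_check_alt (arr : List (List String)) (x_axis : Int) (y_axis : Int) (t : String) : Int :=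
  let row := (PySem.List.pyGet? arr x_axis).getD []
  let cell := (PySem.List.pyGet? row y_axis).getD ""
  if cell == "." then 0
  else if cell == t then 1
  else if y_axis < 1 then 0
  else
    let left := PySem.List.slice row none (some y_axis)
    let window :=
      if left.contains "." then
        match PySem.List.index? left.reverse "." with
        | some idx => PySem.List.slice left (some ((left.length : Int) - 1 - idx)) none
        | none => left     -- unreachable: guarded by the contains test (Python's .index would raise)
      else left
    if window.contains t then 2 else 0

-- ===== PRECONDITION & SPEC =====
-- A raises IndexError exactly when x_axis or y_axis is out of Python range for arr / its row.
def Pre_left_tile_check (arr : List (List String)) (x_axis : Int) (y_axis : Int) (t : String) : Prop :=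
  PySem.Raise.InRange arr.length x_axis ∧
  PySem.Raise.InRange ((PySem.List.pyGet? arr x_axis).getD []).length y_axis
instance (arr : List (List String)) (x_axis : Int) (y_axis : Int) (t : String) : Decidable (Pre_left_tile_check arr x_axis y_axis t) := by unfold Pre_left_tile_check; infer_instance

def pvWitness_left_tile_check : List (List String) × Int × Int × String := ([["x", "o"]], 0, 1, "x")

def Spec_left_tile_check (arr : List (List String)) (x_axis : Int) (y_axis : Int) (t : String) (out : Int) : Prop := out = left_tile_check_alt arr x_axis y_axis t
instance (arr : List (List String)) (x_axis : Int) (y_axis : Int) (t : String) (out : Int) : Decidable (Spec_left_tile_check arr x_axis y_axis t out) := by unfold Spec_left_tile_check; infer_instance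

-- ===== CLAIM (what is proved, stated in full; the proofs are below) =====
def Claim_equal_left_tile_check : Prop := ∀ (arr : List (List String)) (x_axis : Int) (y_axis : Int) (t : String), Dom_left_tile_check arr x_axis y_axis t → Pre_left_tile_check arr x_axis y_axis t → Spec_left_tile_check arr x_axis y_axis t (left_tile_check arr x_axis y_axis t)

-- ===== LEMMAS AND PROOFS =====

-- abstract version of A's scan, over the reversed prefix itself
def pvScan (t : String) : List String → Int → Int
  | [], temp => temp
  | c :: cs, temp =>
    let temp' := if c == t then 2 else temp
    if c == "." then temp' else pvScan t cs temp'

-- B's window, expressed on the reversed prefix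
def pvWRev (r : List String) : List String :=
  match PySem.List.index? r "." with
  | some i => r.take (i + 1)
  | none => r

lemma pvALoop_eq_scan (row : List String) (t : String) :
    ∀ (n : Nat) (temp : Int), n ≤ row.length →
      pvALoop row t (PySem.List.pyRange ((n : Int) - 1) (-1) (-1)) temp
        = pvScan t ((row.take n).reverse) temp := by
  intro n
  induction n with
  | zero =>
    intro temp _
    rw [PySem.List.pyRange_neg_one_eq_nil (by omega)]
    simp [pvALoop, pvScan]
  | succ n ih =>
    intro temp hn
    have h1 : ((n + 1 : Nat) : Int) - 1 = (n : Int) := by push_cast; ring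
    rw [h1, PySem.List.pyRange_neg_one_cons (by omega)]
    have hlt : n < row.length := by omega
    have h2 : PySem.List.pyGet? row (n : Int) = some row[n] :=
      PySem.List.pyGet?_ofNat row n hlt
    have h3 : row.take (n + 1) = row.take n ++ [row[n]] := by
      rw [List.take_add_one]
      simp [List.getElem?_eq_getElem hlt]
    simp only [pvALoop, h2, Option.getD_some, h3, List.reverse_append,
      List.reverse_cons, List.reverse_nil, List.nil_append, List.cons_append,
      pvScan]
    split
    · rfl
    · exact ih _ (by omega)

lemma pvScan_two (t : String) : ∀ (r : List String), pvScan t r 2 = 2 := by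
  intro r
  induction r with
  | nil => rfl
  | cons c cs ih =>
    simp only [pvScan]
    split <;> simp [ih]

lemma pvScan_eq_window (t : String) :
    ∀ (r : List String), pvScan t r 0 = if (pvWRev r).contains t then 2 else 0 := by
  intro r
  induction r with
  | nil => simp [pvScan, pvWRev, PySem.List.index?]
  | cons c cs ih =>
    simp only [pvScan]
    by_cases hdot : c = "."
    · subst hdot
      rw [if_pos (by simp)]
      simp only [pvWRev, PySem.List.index?_cons_self]
      by_cases ht : t = "."
      · simp [ht]
      · have h' : ¬"." = t := fun h => ht h.symm
        simp [List.take_succ_cons, ht, h']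
    · rw [if_neg (by simp [hdot])]
      have hw : pvWRev (c :: cs) = c :: pvWRev cs := by
        simp only [pvWRev,
          PySem.List.index?_cons_of_ne (v := ".") (x := c) (xs := cs) (by simp [hdot])]
        cases h : PySem.List.index? cs "." with
        | none => simp
        | some i => simp [List.take_succ_cons]
      by_cases ht : c = t
      · rw [if_pos (by simp [ht]), pvScan_two, hw, if_pos (by simp [ht])]
      · rw [if_neg (by simp [ht]), ih, hw]
        simp [Ne.symm ht]

-- B's slice-based window has the same members as pvWRev of the reversed prefix
lemma window_contains (l : List String) (t : String) :
    (if l.contains "." then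
        (match PySem.List.index? l.reverse "." with
         | some idx => PySem.List.slice l (some ((l.length : Int) - 1 - idx)) none
         | none => l)
      else l).contains t = (pvWRev l.reverse).contains t := by
  by_cases hdot : "." ∈ l
  · rw [if_pos (by simpa using hdot)]
    have hmem : "." ∈ l.reverse := by simpa using hdot
    obtain ⟨i, hi⟩ := Option.isSome_iff_exists.mp ((PySem.List.index?_isSome_iff _ _).mpr hmem)
    obtain ⟨hk, _, _⟩ := PySem.List.getElem_of_index?_eq_some hi
    have hlen : i < l.length := by simpa using hk
    rw [hi]
    simp only [pvWRev, hi]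
    have hnn : (0 : Int) ≤ (l.length : Int) - 1 - i := by omega
    rw [PySem.List.slice_from l hnn]
    have htn : ((l.length : Int) - 1 - i).toNat = l.length - (i + 1) := by omega
    rw [htn]
    have hdt : l.drop (l.length - (i + 1)) = (l.reverse.take (i + 1)).reverse := by
      rw [List.reverse_take]
      simp
    rw [hdt]
    simp [List.contains_eq_mem, List.mem_reverse]
  · rw [if_neg (by simpa using hdot)]
    have : PySem.List.index? l.reverse "." = none := by
      rw [PySem.List.index?_eq_none_iff]
      simpa using hdot
    simp only [pvWRev, this]
    simp [List.contains_eq_mem, List.mem_reverse]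

-- ===== VERDICT (by name: the statement is the Claim_ definition above) =====
theorem left_tile_check_spec : Claim_equal_left_tile_check := by
  intro arr x y t _ hpre
  obtain ⟨hx, hy⟩ := hpre
  unfold Spec_left_tile_check left_tile_check left_tile_check_alt
  dsimp only
  set row := (PySem.List.pyGet? arr x).getD [] with hrow
  by_cases h1 : ((PySem.List.pyGet? row y).getD "" == ".") = true
  · rw [if_pos h1, if_pos h1]
  · rw [if_neg h1, if_neg h1]
    by_cases h2 : ((PySem.List.pyGet? row y).getD "" == t) = true
    · rw [if_pos h2, if_pos h2]
    · rw [if_neg h2, if_neg h2]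
      by_cases h3 : y < 1
      · rw [if_pos h3, if_neg (by omega : ¬ y - 1 ≥ 0)]
      · rw [if_neg h3, if_pos (by omega : y - 1 ≥ 0)]
        have hylen : y < (row.length : Int) := hy.2
        have hle : y.toNat ≤ row.length := by omega
        have hj : y - 1 = ((y.toNat : Nat) : Int) - 1 := by omega
        rw [hj, pvALoop_eq_scan row t y.toNat 0 hle, pvScan_eq_window,
            PySem.List.slice_to row (by omega : (0:Int) ≤ y),
            window_contains (row.take y.toNat) t]
        cases hc : (pvWRev (row.take y.toNat).reverse).contains t <;> simp [hc]

-- Raise.InRange holds for the witness indices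
theorem left_tile_check_pre_witness :
    Dom_left_tile_check pvWitness_left_tile_check.1 pvWitness_left_tile_check.2.1
      pvWitness_left_tile_check.2.2.1 pvWitness_left_tile_check.2.2.2 ∧
    Pre_left_tile_check pvWitness_left_tile_check.1 pvWitness_left_tile_check.2.1
      pvWitness_left_tile_check.2.2.1 pvWitness_left_tile_check.2.2.2 := by
  constructor <;> decide
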